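-- pv_equiv track=rewrite | github.com/tdamdouni/Pythonista | @generator/create_stub_files.py | get_code_block_stubs
-- ===== SOURCE A (Python) =====
-- def PEP8_split_line(l):
-- 	# assuming its a class or function statement
--
-- 	part = l.partition('(')
-- 	# try the nice way first
-- 	l2 = part[0] + part[1] + '\n' + '\t\t' + part[2]
--
-- 	# if the params exceed the line length, then we just
-- 	# go coyote ugly!!
-- 	if part[2] > 79:
-- 		params = part[2].split(',')
-- 		l2 = part[0] + part[1] + ',\t\n'.join(p for p in params)
--
-- 	return l2
--
-- def get_code_block_stubs(code):
-- 	'''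
-- 		Source code of a class, function, property
-- 		return a list of lines aka code_lines to write out
-- 		to a a file or the console.
-- 	'''
--
-- 	the_code = code[0].splitlines()
-- 	code_lines = []
--
-- 	'''
-- 		create a list of dicts of code lines
-- 		we care about. class, def
--
-- 		i didnt realise unil i seen the posting that putting
-- 		pass : on the same line was acceptable.
-- 		My lack of knowedgle.
--
-- 		Thats ok, i will leave mine like this.
-- 		I can see i am doing a lot of extra proccessing.
-- 		I think could have done all the work in the list comp.
--
-- 		Maybe it more flexible like this. Even though thats
-- 		not the goal :(
--
-- 	'''
--
-- 	wanted_lines = [ {	'line_no' : ln,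
-- 							 	'token': l.strip('\t ').rsplit(' ')[0],
-- 								'delim' : '\t' if l[0].isalpha() else l[0],
-- 								'delim_len' : len(l) - len(l.lstrip(l[0])),
-- 								'the_line' : l.lstrip('\t ')
-- 							}
-- 		for ln, l in enumerate(the_code) if l and
-- 			l.strip('\t ').rsplit(' ')[0] == 'class' or
-- 			l.strip('\t ').rsplit(' ')[0] == 'def'
-- 			]
--
--
-- 	indent = 0
-- 	indent_adjust = 0
--
-- 	for ln, d in enumerate(wanted_lines):
-- 		if len(d['the_line']) > 75:
-- 			#raise Exception('line length exceeds PEP8 79 chars')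
--
-- 			d['the_line'] = PEP8_split_line(d['the_line'])
--
-- 		if ln:
-- 			if d['delim_len'] == ll['delim_len']:
-- 				indent_adjust = 0
-- 			elif d['delim_len'] > ll['delim_len']:
-- 				indent_adjust = 1
-- 			elif d['delim_len'] < ll['delim_len']:
-- 				indent_adjust = -1
--
-- 		# edge case @omz
-- 		if ln:
-- 			if ll['token'] == 'class':
-- 				indent_adjust = 1
--
-- 		indent += indent_adjust
--
-- 		code_lines.append('{}{}'.format('\t' * indent, (d['the_line'])))
-- 		if not d['token'] == 'class':
-- 			code_lines.append('{}pass\n'.format('\t' * (indent+1)))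
--
-- 		# ll is the last dict
-- 		ll = d
--
--
-- 	return code_lines
-- ===== SOURCE B (Python) =====
-- def get_code_block_stubs(code):
--     '''Declarative staged pipeline: project the wanted class/def lines to
--     (token, delim_len, body) triples, derive pairwise indent deltas by zipping
--     consecutive triples, obtain each indent as the sum of a delta prefix, and
--     emit the stub lines from a zip of triples with indents; no mutable
--     indent/last-line state is threaded anywhere.'''
--
--     def token(l):
--         return l.strip('\t ').split(' ')[0]
--
--     def body(l):
--         t = l.lstrip('\t ')
--         if len(t) > 75:
--             a, b, c = t.partition('(')
--             t = a + b + '\n\t\t' + c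
--         return t
--
--     wanted = [(token(l), len(l) - len(l.lstrip(l[0])), body(l))
--               for l in code[0].splitlines() if token(l) in ('class', 'def')]
--     deltas = [1 if pt == 'class' or d > pd else -1 if d < pd else 0
--               for (pt, pd, _), (_, d, _) in zip(wanted, wanted[1:])]
--     indents = [sum(deltas[:i]) for i in range(len(wanted))]
--     return [s
--             for (tok, _, text), ind in zip(wanted, indents)
--             for s in (['\t' * ind + text] if tok == 'class'
--                       else ['\t' * ind + text, '\t' * (ind + 1) + 'pass\n'])]
-- ===== Notes on version B (the rewrite author's own statement) =====
-- stated objective: alternative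
-- what changed: B replaces A's two-phase pipeline with a stateful emission loop (dict records, then a fold threading indent/indent_adjust/ll) by a stateless staged pipeline: project wanted lines to triples, derive pairwise indent deltas by zipping consecutive triples, compute each indent as the sum of a delta prefix, and emit from a zip of triples with indents.
import Mathlib
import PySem

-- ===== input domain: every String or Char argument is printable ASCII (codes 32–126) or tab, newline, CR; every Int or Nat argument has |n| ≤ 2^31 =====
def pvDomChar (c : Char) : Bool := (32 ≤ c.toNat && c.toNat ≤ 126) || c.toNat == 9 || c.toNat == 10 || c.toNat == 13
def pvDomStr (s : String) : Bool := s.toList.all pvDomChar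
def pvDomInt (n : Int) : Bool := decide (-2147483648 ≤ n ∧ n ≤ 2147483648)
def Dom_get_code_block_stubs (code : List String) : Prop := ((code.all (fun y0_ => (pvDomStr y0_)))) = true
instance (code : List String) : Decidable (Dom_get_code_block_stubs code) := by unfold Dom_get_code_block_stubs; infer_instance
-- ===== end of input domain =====

-- B replaces A's stateful second loop (threading indent/indent_adjust/ll through dict
-- records) by a stateless staged pipeline: pairwise indent deltas from a zip of
-- consecutive wanted lines, indents as prefix sums of those deltas (objective: alternative).

-- ===== shared string primitives (exact ports of the Python string operations used) =====

-- l.lstrip('\t ')  (left strip of tabs and spaces; exact)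
def pvLstripTS (cs : List Char) : List Char := cs.dropWhile (fun c => c == '\t' || c == ' ')

-- '\t' * n  (Python string repetition; empty for n ≤ 0; exact)
def pvTabs (n : Int) : List Char := List.replicate n.toNat '\t'

-- len(l) - len(l.lstrip(l[0]))  (count of leading copies of the first char; caller guarantees l ≠ [])
def pvDelimLen (cs : List Char) : Int :=
  match cs with
  | [] => 0      -- unreachable: only applied to non-empty lines
  | c :: _ => (cs.length : Int) - ((cs.dropWhile (· == c)).length : Int)

-- ===== PORT A =====

-- PEP8_split_line's first result l2: part = l.partition('('); part[0]+part[1]+'\n'+'\t\t'+part[2].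
-- (The Python function then evaluates `part[2] > 79`, a str-int comparison that raises
-- TypeError; that path is excluded by Pre_, so the port returns the computed l2.)
def pvPEP8 (cs : List Char) : List Char :=
  let before := cs.takeWhile (· ≠ '(')
  let rest := cs.dropWhile (· ≠ '(')
  match rest with
  | [] => cs ++ ('\n' :: '\t' :: '\t' :: [])                     -- '(' absent: part[1] = part[2] = ''
  | _ :: after => before ++ ('(' :: '\n' :: '\t' :: '\t' :: after)

-- l.strip('\t ').rsplit(' ')[0]: rsplit(' ') with no maxsplit is a full split on ' ',
-- hand-ported (PySem has no rsplit); exact.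
def pvSplitSp : List Char → List (List Char)
  | [] => [[]]
  | c :: rest =>
      if c = ' ' then [] :: pvSplitSp rest
      else match pvSplitSp rest with
           | [] => [[c]]          -- unreachable: pvSplitSp never returns []
           | h :: t => (c :: h) :: t

def pvTokA (l : List Char) : List Char :=
  (pvSplitSp (PySem.Chars.stripChars l ['\t', ' '])).headD []

-- the comprehension's condition:  l and tok == 'class' or tok == 'def'
def pvWantedA (l : List Char) : Bool :=
  (!l.isEmpty && pvTokA l == "class".toList) || pvTokA l == "def".toList

structure PvEntry where
  line_no : Int
  token : List Char
  delim : List Char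
  delim_len : Int
  the_line : List Char
deriving Repr

def pvMkEntry (ln : Int) (l : List Char) : PvEntry :=
  { line_no := ln
    token := pvTokA l
    delim := if PySem.Chars.isalpha (l.headD ' ') then ['\t'] else [l.headD ' ']  -- l[0]; l ≠ [] under the filter
    delim_len := pvDelimLen l
    the_line := pvLstripTS l }

def pvStepA (st : Int × Int × PvEntry × List (List Char)) (p : Int × PvEntry) :
    Int × Int × PvEntry × List (List Char) :=
  let indent := st.1; let adj := st.2.1; let ll := st.2.2.1; let acc := st.2.2.2
  let ln := p.1; let d0 := p.2
  let d := if 75 < d0.the_line.length then { d0 with the_line := pvPEP8 d0.the_line } else d0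
  let adj := if ln ≠ 0 then
      (if d.delim_len == ll.delim_len then 0
       else if ll.delim_len < d.delim_len then 1
       else if d.delim_len < ll.delim_len then -1
       else adj)
    else adj
  let adj := if ln ≠ 0 then (if ll.token == "class".toList then 1 else adj) else adj
  let indent := indent + adj
  let acc := acc ++ [pvTabs indent ++ d.the_line]
  let acc := if !(d.token == "class".toList) then acc ++ [pvTabs (indent + 1) ++ "pass\n".toList] else acc
  (indent, adj, d, acc)

def pvDummyEntry : PvEntry := { line_no := 0, token := [], delim := [], delim_len := 0, the_line := [] }

def get_code_block_stubs (code : List String) : List String :=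
  let the_code := PySem.Chars.splitlines ((code.headD "").toList)   -- code[0]; code ≠ [] under Pre_
  let wanted_lines := ((PySem.List.enumerate the_code).filter (fun p => pvWantedA p.2)).map
      (fun p => pvMkEntry p.1 p.2)
  let fin := (PySem.List.enumerate wanted_lines).foldl pvStepA (0, 0, pvDummyEntry, [])
  fin.2.2.2.map String.ofList

-- ===== PORT B =====

-- token(l) = l.strip('\t ').split(' ')[0]
def pvTokB (l : List Char) : List Char :=
  (PySem.Chars.stripChars l ['\t', ' ']).takeWhile (· ≠ ' ')

-- body(l): lstrip, then the PEP8 '(' insertion when the result exceeds 75 chars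
def pvBody (l : List Char) : List Char :=
  let t := pvLstripTS l
  if 75 < t.length then
    let a := t.takeWhile (· ≠ '(')
    match t.dropWhile (· ≠ '(') with
    | [] => t ++ ('\n' :: '\t' :: '\t' :: [])
    | _ :: c => a ++ ('(' :: '\n' :: '\t' :: '\t' :: c)
  else t

-- the delta expression of B's `deltas` comprehension
def pvDelta (pt : List Char) (pd d : Int) : Int :=
  if pt == "class".toList || pd < d then 1 else if d < pd then -1 else 0

-- sum(ds[:n])
def pvSumTake (ds : List Int) (n : Nat) : Int := (ds.take n).foldl (· + ·) 0

def get_code_block_stubs_alt (code : List String) : List String :=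
  let wanted := ((PySem.Chars.splitlines ((code.headD "").toList)).filter
      (fun l => pvTokB l == "class".toList || pvTokB l == "def".toList)).map
      (fun l => (pvTokB l, pvDelimLen l, pvBody l))
  let deltas := (wanted.zip wanted.tail).map (fun pc => pvDelta pc.1.1 pc.1.2.1 pc.2.2.1)
  let indents := (List.range wanted.length).map (fun i => pvSumTake deltas i)
  ((wanted.zip indents).flatMap (fun p =>
      if p.1.1 == "class".toList then [pvTabs p.2 ++ p.1.2.2]
      else [pvTabs p.2 ++ p.1.2.2, pvTabs (p.2 + 1) ++ "pass\n".toList])).map String.ofList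

-- ===== PRECONDITION & SPEC =====
-- Pre_ excludes exactly the inputs on which A raises: the empty list (code[0] is an
-- IndexError) and sources containing a class/def line whose stripped length exceeds 75
-- (PEP8_split_line then compares a str with an int, a TypeError).
def Pre_get_code_block_stubs (code : List String) : Prop :=
  code ≠ [] ∧
  ∀ l ∈ PySem.Chars.splitlines ((code.headD "").toList),
    ((PySem.Chars.stripChars l ['\t', ' ']).takeWhile (· ≠ ' ') = "class".toList ∨
     (PySem.Chars.stripChars l ['\t', ' ']).takeWhile (· ≠ ' ') = "def".toList) →
    (l.dropWhile (fun c => c == '\t' || c == ' ')).length ≤ 75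
instance (code : List String) : Decidable (Pre_get_code_block_stubs code) := by
  unfold Pre_get_code_block_stubs; infer_instance

def pvWitness_get_code_block_stubs : List String := ["class A:\n\tdef f(x):\ndef g():"]

def Spec_get_code_block_stubs (code : List String) (out : List String) : Prop :=
  out = get_code_block_stubs_alt code
instance (code : List String) (out : List String) : Decidable (Spec_get_code_block_stubs code out) := by
  unfold Spec_get_code_block_stubs; infer_instance

-- ===== CLAIM (what is proved, stated in full; the proofs are below) =====
def Claim_equal_get_code_block_stubs : Prop :=
  ∀ (code : List String), Dom_get_code_block_stubs code → Pre_get_code_block_stubs code →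
    Spec_get_code_block_stubs code (get_code_block_stubs code)

-- ===== LEMMAS AND PROOFS =====

-- canonical form both ports are reduced to: a fold over the projections
-- (token, delim_len, the_line) of the wanted lines
def pvProjLine (l : List Char) : List Char × Int × List Char :=
  (pvTokA l, pvDelimLen l, pvLstripTS l)

def pvFix (tl : List Char) : List Char := if 75 < tl.length then pvPEP8 tl else tl

def pvFix3 (t : List Char × Int × List Char) : List Char × Int × List Char :=
  (t.1, t.2.1, pvFix t.2.2)

def pvEmit (indent : Int) (tok tl : List Char) : List (List Char) :=
  (pvTabs indent ++ tl) ::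
    (if tok == "class".toList then [] else [pvTabs (indent + 1) ++ "pass\n".toList])

def pvIndentStep (ptok : List Char) (pd dlen indent : Int) : Int :=
  if ptok == "class".toList then indent + 1
  else if pd < dlen then indent + 1
  else if dlen < pd then indent - 1
  else indent

def pvRunTail : List (List Char × Int × List Char) → (List Char × Int) → Int → List (List Char) →
    List (List Char)
  | [], _, _, acc => acc
  | (tok, dlen, tl) :: rest, (ptok, pd), indent, acc =>
    pvRunTail rest (tok, dlen) (pvIndentStep ptok pd dlen indent)
      (acc ++ pvEmit (pvIndentStep ptok pd dlen indent) tok (pvFix tl))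

def pvRun : List (List Char × Int × List Char) → List (List Char)
  | [] => []
  | (tok, dlen, tl) :: rest => pvRunTail rest (tok, dlen) 0 (pvEmit 0 tok (pvFix tl))

theorem pvSplitSp_ne_nil (cs : List Char) : pvSplitSp cs ≠ [] := by
  induction cs with
  | nil => simp [pvSplitSp]
  | cons c rest ih =>
      by_cases h : c = ' '
      · simp [pvSplitSp, h]
      · cases hs : pvSplitSp rest <;> simp [pvSplitSp, h, hs]

theorem pvSplitSp_headD (cs : List Char) :
    (pvSplitSp cs).headD [] = cs.takeWhile (· ≠ ' ') := by
  induction cs with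
  | nil => simp [pvSplitSp]
  | cons c rest ih =>
      by_cases h : c = ' '
      · simp [pvSplitSp, h, List.takeWhile]
      · cases hs : pvSplitSp rest with
        | nil => exact absurd hs (pvSplitSp_ne_nil rest)
        | cons x t => simp [hs] at ih; simp [pvSplitSp, h, hs, List.takeWhile, ih]

theorem pvTok_eq (l : List Char) : pvTokA l = pvTokB l := by
  unfold pvTokA pvTokB
  exact pvSplitSp_headD _

theorem pvTokB_nil : pvTokB [] = [] := by decide

theorem pvWanted_eq (l : List Char) :
    pvWantedA l = (pvTokB l == "class".toList || pvTokB l == "def".toList) := by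
  cases l with
  | nil => simp [pvWantedA, pvTok_eq, pvTokB_nil]
  | cons c t => simp [pvWantedA, pvTok_eq]

-- ---- A reduces to pvRun over the projected wanted lines ----

theorem pvWanted_proj (es : List (Int × List Char)) :
    (((es.filter (fun p => pvWantedA p.2)).map (fun p => pvMkEntry p.1 p.2)).map
        (fun e => (e.token, e.delim_len, e.the_line))) =
      ((es.map Prod.snd).filter pvWantedA).map pvProjLine := by
  induction es with
  | nil => simp
  | cons p es ih =>
      cases hw : pvWantedA p.2 <;> (simp [hw, ih]; try simp [pvMkEntry, pvProjLine])

theorem pvEnumerate_map_snd {a : Type} (xs : List a) (s : Int) :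
    (PySem.List.enumerate xs s).map Prod.snd = xs := by
  induction xs generalizing s <;> simp [PySem.List.enumerate_cons, *]

theorem pvStepA_tail (st : Int × Int × PvEntry × List (List Char)) (ln : Int) (d0 : PvEntry)
    (h : ln ≠ 0) :
    pvStepA st (ln, d0) =
      (pvIndentStep st.2.2.1.token st.2.2.1.delim_len d0.delim_len st.1,
       pvIndentStep st.2.2.1.token st.2.2.1.delim_len d0.delim_len st.1 - st.1,
       (if 75 < d0.the_line.length then { d0 with the_line := pvPEP8 d0.the_line } else d0),
       st.2.2.2 ++ pvEmit (pvIndentStep st.2.2.1.token st.2.2.1.delim_len d0.delim_len st.1)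
         d0.token (pvFix d0.the_line)) := by
  obtain ⟨indent, adj, ll, acc⟩ := st
  simp only [pvStepA, pvIndentStep, pvEmit, pvFix, if_pos h]
  split <;>
    (simp only [beq_iff_eq] at *
     split_ifs <;> simp_all [sub_eq_add_neg] <;> omega)

theorem pvA_tail (es : List PvEntry) : ∀ (s : Int), 1 ≤ s →
    ∀ (ll : PvEntry) (indent adj : Int) (acc : List (List Char)),
    ((PySem.List.enumerate es s).foldl pvStepA (indent, adj, ll, acc)).2.2.2 =
      pvRunTail (es.map (fun e => (e.token, e.delim_len, e.the_line)))
        (ll.token, ll.delim_len) indent acc := by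
  induction es with
  | nil => intro s _ ll indent adj acc; simp [pvRunTail, PySem.List.enumerate]
  | cons d es ih =>
      intro s hs ll indent adj acc
      rw [PySem.List.enumerate_cons, List.foldl_cons, pvStepA_tail _ _ _ (by omega)]
      simp only [List.map_cons, pvRunTail]
      rw [ih (s + 1) (by omega)]
      split <;> simp

theorem pvA_eq_run (ws : List PvEntry) :
    ((PySem.List.enumerate ws).foldl pvStepA (0, 0, pvDummyEntry, [])).2.2.2 =
      pvRun (ws.map (fun e => (e.token, e.delim_len, e.the_line))) := by
  cases ws with
  | nil => simp [pvRun, PySem.List.enumerate]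
  | cons e ws =>
      rw [PySem.List.enumerate_cons, List.foldl_cons]
      have h0 : pvStepA (0, 0, pvDummyEntry, []) (0, e) =
          ((0 : Int), (0 : Int),
           (if 75 < e.the_line.length then { e with the_line := pvPEP8 e.the_line } else e),
           pvEmit 0 e.token (pvFix e.the_line)) := by
        simp only [pvStepA, pvEmit, pvFix,
          if_neg (show ¬((0 : Int) ≠ 0) from fun h => h rfl)]
        split <;> split <;> simp_all
      rw [h0, show (0 : Int) + 1 = 1 from rfl, pvA_tail ws 1 (by omega)]
      simp only [List.map_cons, pvRun]
      split <;> simp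

-- ---- B reduces to the same pvRun ----

theorem pvBody_eq (l : List Char) : pvBody l = pvFix (pvLstripTS l) := by
  unfold pvBody pvFix pvPEP8
  rfl

-- stateless scan form of pvRunTail (acc removed), on fixed triples
def pvScanF : List (List Char × Int × List Char) → (List Char × Int) → Int → List (List Char)
  | [], _, _ => []
  | (tok, dlen, tl) :: rest, (ptok, pd), i =>
      pvEmit (pvIndentStep ptok pd dlen i) tok tl ++
        pvScanF rest (tok, dlen) (pvIndentStep ptok pd dlen i)

theorem pvRunTail_eq_scan (ts : List (List Char × Int × List Char)) :
    ∀ (ptok : List Char) (pd i : Int) (acc : List (List Char)),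
    pvRunTail ts (ptok, pd) i acc = acc ++ pvScanF (ts.map pvFix3) (ptok, pd) i := by
  induction ts with
  | nil => intro ptok pd i acc; simp [pvRunTail, pvScanF]
  | cons t rest ih =>
      intro ptok pd i acc
      obtain ⟨tok, dlen, tl⟩ := t
      simp only [pvRunTail, List.map_cons, pvFix3, pvScanF, ih, List.append_assoc]

-- the chain of deltas seeded with the previous (token, delim_len)
def pvChain : (List Char × Int) → List (List Char × Int × List Char) → List Int
  | _, [] => []
  | (pt, pd), t :: rest => pvDelta pt pd t.2.1 :: pvChain (t.1, t.2.1) rest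

theorem pvZip_deltas (prev : List Char × Int × List Char)
    (rest : List (List Char × Int × List Char)) :
    (((prev :: rest).zip rest).map (fun pc => pvDelta pc.1.1 pc.1.2.1 pc.2.2.1)) =
      pvChain (prev.1, prev.2.1) rest := by
  induction rest generalizing prev with
  | nil => simp [pvChain]
  | cons t rs ih => simp [pvChain, ih t]

theorem pvIndentStep_delta (ptok : List Char) (pd d i : Int) :
    pvIndentStep ptok pd d i = i + pvDelta ptok pd d := by
  unfold pvIndentStep pvDelta
  split_ifs <;> simp_all <;> omega

theorem pvSumTake_zero (ds : List Int) : pvSumTake ds 0 = 0 := rfl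

theorem pvFoldl_add_shift (l : List Int) : ∀ (a : Int), l.foldl (· + ·) a = a + l.foldl (· + ·) 0 := by
  induction l with
  | nil => intro a; simp
  | cons x xs ih =>
      intro a
      simp only [List.foldl_cons]
      rw [ih (a + x), ih (0 + x)]
      omega

theorem pvSumTake_cons (d : Int) (ds : List Int) (n : Nat) :
    pvSumTake (d :: ds) (n + 1) = d + pvSumTake ds n := by
  unfold pvSumTake
  simp only [List.take_succ_cons, List.foldl_cons]
  rw [pvFoldl_add_shift]
  omega

theorem pvEmit_flat (tok : List Char) (tl : List Char) (ind : Int) :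
    (if tok == "class".toList then [pvTabs ind ++ tl]
     else [pvTabs ind ++ tl, pvTabs (ind + 1) ++ "pass\n".toList]) = pvEmit ind tok tl := by
  unfold pvEmit
  split <;> simp_all

theorem pvScan_flat (ts : List (List Char × Int × List Char)) :
    ∀ (pt : List Char) (pd i0 : Int),
    ((ts.zip ((List.range ts.length).map
        (fun j => i0 + pvSumTake (pvChain (pt, pd) ts) (j + 1)))).flatMap (fun p =>
      if p.1.1 == "class".toList then [pvTabs p.2 ++ p.1.2.2]
      else [pvTabs p.2 ++ p.1.2.2, pvTabs (p.2 + 1) ++ "pass\n".toList])) =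
      pvScanF ts (pt, pd) i0 := by
  induction ts with
  | nil => intro pt pd i0; simp [pvScanF]
  | cons t rest ih =>
      intro pt pd i0
      obtain ⟨tok, dlen, tl⟩ := t
      rw [List.length_cons, List.range_succ_eq_map]
      simp only [List.map_cons, List.map_map, List.zip_cons_cons, List.flatMap_cons, pvChain]
      have h1 : i0 + pvSumTake (pvDelta pt pd dlen :: pvChain (tok, dlen) rest) (0 + 1) =
          pvIndentStep pt pd dlen i0 := by
        rw [pvSumTake_cons, pvSumTake_zero, pvIndentStep_delta]; omega
      have h2 : ((List.range rest.length).map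
            ((fun j => i0 + pvSumTake (pvDelta pt pd dlen :: pvChain (tok, dlen) rest) (j + 1)) ∘
              Nat.succ)) =
          (List.range rest.length).map
            (fun j => (pvIndentStep pt pd dlen i0) + pvSumTake (pvChain (tok, dlen) rest) (j + 1)) := by
        refine List.map_congr_left fun j _ => ?_
        simp only [Function.comp_apply, Nat.succ_eq_add_one, pvSumTake_cons, pvIndentStep_delta]
        omega
      rw [h1, h2, ih, pvEmit_flat]
      simp [pvScanF]

theorem pvB_eq_run (lines : List (List Char)) :
    (let wanted := ((lines.filter
          (fun l => pvTokB l == "class".toList || pvTokB l == "def".toList)).map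
          (fun l => (pvTokB l, pvDelimLen l, pvBody l)))
     let deltas := (wanted.zip wanted.tail).map (fun pc => pvDelta pc.1.1 pc.1.2.1 pc.2.2.1)
     let indents := (List.range wanted.length).map (fun i => pvSumTake deltas i)
     (wanted.zip indents).flatMap (fun p =>
        if p.1.1 == "class".toList then [pvTabs p.2 ++ p.1.2.2]
        else [pvTabs p.2 ++ p.1.2.2, pvTabs (p.2 + 1) ++ "pass\n".toList])) =
      pvRun ((lines.filter pvWantedA).map pvProjLine) := by
  have hfilter : lines.filter (fun l => pvTokB l == "class".toList || pvTokB l == "def".toList) =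
      lines.filter pvWantedA :=
    (List.filter_congr (fun l _ => pvWanted_eq l)).symm
  have hmap : (lines.filter pvWantedA).map (fun l => (pvTokB l, pvDelimLen l, pvBody l)) =
      ((lines.filter pvWantedA).map pvProjLine).map pvFix3 := by
    rw [List.map_map]
    refine List.map_congr_left fun l _ => ?_
    simp [pvProjLine, pvFix3, pvBody_eq, pvTok_eq]
  rw [hfilter]
  simp only [hmap]
  cases hws : (lines.filter pvWantedA).map pvProjLine with
  | nil => simp [pvRun]
  | cons w rest =>
      obtain ⟨tok, dlen, tl⟩ := w
      simp only [List.map_cons, pvRun, pvRunTail_eq_scan, pvFix3, List.tail_cons]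
      rw [pvZip_deltas]
      simp only [List.length_cons, List.range_succ_eq_map, List.map_cons, List.map_map,
        List.zip_cons_cons, List.flatMap_cons, pvSumTake_zero]
      have h2 : ((List.range (rest.map pvFix3).length).map
            ((fun i => pvSumTake (pvChain (tok, dlen) (rest.map pvFix3)) i) ∘ Nat.succ)) =
          (List.range (rest.map pvFix3).length).map
            (fun j => (0 : Int) + pvSumTake (pvChain (tok, dlen) (rest.map pvFix3)) (j + 1)) := by
        refine List.map_congr_left fun j _ => ?_
        simp [Function.comp_apply, Nat.succ_eq_add_one]
      rw [h2, pvScan_flat, pvEmit_flat]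

-- ===== VERDICT (by name: the statement is the Claim_ definition above) =====
theorem get_code_block_stubs_spec : Claim_equal_get_code_block_stubs := by
  intro code _ _
  unfold Spec_get_code_block_stubs get_code_block_stubs get_code_block_stubs_alt
  simp only [pvA_eq_run, pvWanted_proj, pvEnumerate_map_snd, pvB_eq_run]
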